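-- pv_equiv track=rewrite | github.com/loh-0/Lohith-Coding-Projects | connectk.py | pos_diagonal_check_k
-- ===== SOURCE A (Python) =====
-- def pos_diagonal_check_k(board,player, k):
-- 	'''
-- 	Inputs: (board, player, k)
-- 	returns a count for how many positive diagonal ks there are on the board
--
-- 	'''
-- 	consectokens = 0
-- 	count = 0
-- 	#iterating through the board
-- 	for column in range(len(board[0]) - (k - 1)):
-- 		for row in range(len(board) - (k - 1), len(board)):
-- 			#checking consecutive pieces for the player
-- 			if board[row][column] == player:
-- 				consectokens = 0
-- 				for kadd in range(k):
-- 					if board[row][column] == board[row - kadd][column + kadd]: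
-- 						consectokens += 1
-- 						if consectokens == k:
-- 							count+= 1
-- 	return count
-- ===== SOURCE B (Python) =====
-- def pos_diagonal_check_k(board, player, k):
--     '''
--     Inputs: (board, player, k)
--     returns a count for how many positive diagonal ks there are on the board
--     '''
--     n = len(board)
--     m = len(board[0])
--     count = 0
--     run = [0] * (m + 1)
--     # run[c] = length of the consecutive player streak ending at the current
--     # cell and going up-right; a window of k is complete whenever run[c] >= k
--     for t, row in enumerate(board):
--         run = [run[c + 1] + 1 if row[c] == player else 0 for c in range(m)] + [0]
--         if t >= n - k + 1:
--             count += sum(1 for c in range(m - k + 1) if run[c] >= k)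
--     return count
-- ===== Notes on version B (the rewrite author's own statement) =====
-- stated objective: alternative
-- what changed: Replaces the per-cell k-step diagonal re-scan by a run-length dynamic program: one top-to-bottom pass keeps, per column, the length of the player streak ending at that cell going up-right and counts columns whose streak reaches k; Pre_ excludes the empty board, boards with a row shorter than row 0 (A raises IndexError when its scan reads past such a row; B reads every row at row 0's width) and boards with fewer than k-1 rows (A's scan can read row indices below -len(board), IndexError when a player piece triggers it).
-- intended difference: On boards with at least k-1 but fewer than 2k-2 rows that contain a fully-player positive diagonal window wrapping past the top edge (via Python negative row indices), A also counts these wrapped windows while B counts only windows lying on the board, which is the intended count of on-board diagonals. — e.g. on pos_diagonal_check_k([[1, 1, 1], [1, 1, 1]], 1, 3): A returns 2, B returns 0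
-- outside the precondition, e.g. on pos_diagonal_check_k([[1, 1], [1]], 1, 3): A returns 0, B raises IndexError; on pos_diagonal_check_k([[0, 0, 0]], 1, 3): A returns 0, B returns 0
import Mathlib
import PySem

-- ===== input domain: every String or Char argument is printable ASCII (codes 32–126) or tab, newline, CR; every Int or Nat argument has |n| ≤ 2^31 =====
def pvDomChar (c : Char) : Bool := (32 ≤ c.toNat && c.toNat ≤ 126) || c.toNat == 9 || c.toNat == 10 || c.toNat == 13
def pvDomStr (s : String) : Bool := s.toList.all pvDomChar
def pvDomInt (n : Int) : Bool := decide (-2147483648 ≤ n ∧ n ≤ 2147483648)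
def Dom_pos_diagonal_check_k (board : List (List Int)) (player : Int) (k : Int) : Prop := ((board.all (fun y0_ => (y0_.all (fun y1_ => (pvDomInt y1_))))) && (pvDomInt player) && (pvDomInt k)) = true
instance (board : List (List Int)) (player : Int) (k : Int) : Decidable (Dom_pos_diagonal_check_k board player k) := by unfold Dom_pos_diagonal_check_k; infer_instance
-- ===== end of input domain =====

-- B replaces A's per-cell k-step diagonal re-scan by a run-length dynamic program
-- over the rows (objective: alternative); on boards with fewer than 2k-2 rows B counts
-- only windows lying on the board, while A also counts windows wrapping past the top
-- edge through Python's negative row indices (stated as the intended difference D_).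


-- ===== PORT A =====
-- board[r][c] under Python indexing (negative index wraps, exact via pyGetD); the
-- defaults are only reachable where Python raises IndexError, which Pre_ excludes.
def pvCell (board : List (List Int)) (r c : Int) : Int :=
  PySem.List.pyGetD (PySem.List.pyGetD board r []) c 0

def pos_diagonal_check_k (board : List (List Int)) (player : Int) (k : Int) : Int :=
  let n : Int := (board.length : Int)
  let m : Int := ((PySem.List.pyGetD board 0 []).length : Int)
  ((PySem.List.pyRange 0 (m - (k - 1)) 1).foldl (fun st column =>
    (PySem.List.pyRange (n - (k - 1)) n 1).foldl (fun st row =>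
      if pvCell board row column == player then
        (PySem.List.pyRange 0 k 1).foldl (fun st kadd =>
          if pvCell board row column == pvCell board (row - kadd) (column + kadd) then
            (st.1 + 1, if st.1 + 1 == k then st.2 + 1 else st.2)
          else st) ((0 : Int), st.2)
      else st) st) ((0 : Int), (0 : Int))).2

-- ===== PORT B =====
-- run = [run[c+1] + 1 if row[c] == player else 0 for c in range(m)] + [0]
def pvStepRowB (player m : Int) (row prev : List Int) : List Int :=
  ((PySem.List.pyRange 0 m 1).map (fun c =>
    if PySem.List.pyGetD row c 0 == player then PySem.List.pyGetD prev (c + 1) 0 + 1 else 0)) ++ [(0 : Int)]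

-- sum(1 for c in range(m - k + 1) if run[c] >= k)
def pvRowCount (k m : Int) (cur : List Int) : Int :=
  (PySem.List.pyRange 0 (m - k + 1) 1).foldl
    (fun s c => if k ≤ PySem.List.pyGetD cur c 0 then s + 1 else s) 0

def pos_diagonal_check_k_alt (board : List (List Int)) (player : Int) (k : Int) : Int :=
  let n : Int := (board.length : Int)
  let m : Int := ((PySem.List.pyGetD board 0 []).length : Int)
  ((PySem.List.enumerate board 0).foldl (fun st tr =>
      let run := pvStepRowB player m tr.2 st.1
      (run, if n - k + 1 ≤ tr.1 then st.2 + pvRowCount k m run else st.2))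
    (List.replicate (m.toNat + 1) (0 : Int), (0 : Int))).2

-- ===== PRECONDITION & SPEC =====
-- Pre_ excludes the empty board (both programs raise IndexError), boards with a row
-- shorter than row 0 (A raises IndexError when its scan reads past such a row, and B
-- reads every row at row 0's width) and, when the scanning loops run (2 ≤ k ≤ width),
-- boards with fewer than k-1 rows, where A's diagonal scan can reach row indices
-- below -len(board) (IndexError as soon as a player piece triggers the inner scan).
def Pre_pos_diagonal_check_k (board : List (List Int)) (player : Int) (k : Int) : Prop :=
  board ≠ [] ∧ (∀ row ∈ board, (board.headD []).length ≤ row.length) ∧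
    (2 ≤ k → k ≤ ((board.headD []).length : Int) → k - 1 ≤ (board.length : Int))

instance (board : List (List Int)) (player : Int) (k : Int) : Decidable (Pre_pos_diagonal_check_k board player k) := by
  unfold Pre_pos_diagonal_check_k; infer_instance

def pvWitness_pos_diagonal_check_k : List (List Int) × Int × Int := ([[1, 1], [1, 1]], 1, 2)

-- On boards with k-1 ≤ rows < 2k-2 containing a fully-player positive diagonal window
-- that wraps past the top edge (Python negative row indices, read here off the doubled
-- list board ++ board), A also counts these wrapped windows; B counts only windows
-- lying on the board, the intended count.
def D_pos_diagonal_check_k (board : List (List Int)) (player : Int) (k : Int) : Prop :=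
  k - 1 ≤ (board.length : Int) ∧
  ∃ r ∈ PySem.List.pyRange ((board.length : Int) - k + 1) (k - 1) 1,
    ∃ c ∈ PySem.List.pyRange 0 (((board.headD []).length : Int) - k + 1) 1,
      ∀ i ∈ PySem.List.pyRange 0 k 1,
        (((board ++ board).getD ((board.length : Int) + r - i).toNat []).getD (c + i).toNat 0) = player

instance (board : List (List Int)) (player : Int) (k : Int) : Decidable (D_pos_diagonal_check_k board player k) := by
  unfold D_pos_diagonal_check_k; infer_instance

def Spec_pos_diagonal_check_k (board : List (List Int)) (player : Int) (k : Int) (out : Int) : Prop := ¬ D_pos_diagonal_check_k board player k → out = pos_diagonal_check_k_alt board player k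
instance (board : List (List Int)) (player : Int) (k : Int) (out : Int) : Decidable (Spec_pos_diagonal_check_k board player k out) := by unfold Spec_pos_diagonal_check_k; infer_instance

def pvDiffWitness_pos_diagonal_check_k : List (List Int) × Int × Int := ([[1, 1, 1], [1, 1, 1]], 1, 3)
def pvDiffWitnessOut_pos_diagonal_check_k : Int × Int := (2, 0)

-- ===== CLAIM (what is proved, stated in full; the proofs are below) =====
def Claim_unchanged_pos_diagonal_check_k : Prop := ∀ (board : List (List Int)) (player : Int) (k : Int), Dom_pos_diagonal_check_k board player k → Pre_pos_diagonal_check_k board player k → Spec_pos_diagonal_check_k board player k (pos_diagonal_check_k board player k)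
def Claim_changed_pos_diagonal_check_k : Prop := Dom_pos_diagonal_check_k (pvDiffWitness_pos_diagonal_check_k.1) (pvDiffWitness_pos_diagonal_check_k.2.1) (pvDiffWitness_pos_diagonal_check_k.2.2) ∧ Pre_pos_diagonal_check_k (pvDiffWitness_pos_diagonal_check_k.1) (pvDiffWitness_pos_diagonal_check_k.2.1) (pvDiffWitness_pos_diagonal_check_k.2.2) ∧ D_pos_diagonal_check_k (pvDiffWitness_pos_diagonal_check_k.1) (pvDiffWitness_pos_diagonal_check_k.2.1) (pvDiffWitness_pos_diagonal_check_k.2.2) ∧ pos_diagonal_check_k (pvDiffWitness_pos_diagonal_check_k.1) (pvDiffWitness_pos_diagonal_check_k.2.1) (pvDiffWitness_pos_diagonal_check_k.2.2) = pvDiffWitnessOut_pos_diagonal_check_k.1 ∧ pos_diagonal_check_k_alt (pvDiffWitness_pos_diagonal_check_k.1) (pvDiffWitness_pos_diagonal_check_k.2.1) (pvDiffWitness_pos_diagonal_check_k.2.2) = pvDiffWitnessOut_pos_diagonal_check_k.2 ∧ pvDiffWitnessOut_pos_diagonal_check_k.1 ≠ pvDiffWitnessOut_pos_diagonal_check_k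.2
def Claim_exact_pos_diagonal_check_k : Prop := ∀ (board : List (List Int)) (player : Int) (k : Int), Dom_pos_diagonal_check_k board player k → Pre_pos_diagonal_check_k board player k → D_pos_diagonal_check_k board player k → pos_diagonal_check_k board player k ≠ pos_diagonal_check_k_alt board player k

-- ===== LEMMAS AND PROOFS =====

-- The window predicate A counts: all k cells of the positive diagonal starting at
-- (r, c) (going up-right, Python row indexing with wrap) belong to the player.
def pvWin (board : List (List Int)) (player k r c : Int) : Bool :=
  (PySem.List.pyRange 0 k 1).all (fun i => pvCell board (r - i) (c + i) == player)

-- The window predicate B counts: additionally the window must lie on the board.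
def pvWinB (board : List (List Int)) (player k r c : Int) : Bool :=
  decide (k ≤ r + 1) && pvWin board player k r c

def pvN (board : List (List Int)) : Int := (board.length : Int)
def pvM (board : List (List Int)) : Int := ((PySem.List.pyGetD board 0 []).length : Int)

-- column-major double sum of window indicators (A's iteration order)
def pvTotal (board : List (List Int)) (player k : Int) : Int :=
  ((PySem.List.pyRange 0 (pvM board - k + 1) 1).map (fun c =>
    ((PySem.List.pyRange (pvN board - k + 1) (pvN board) 1).map (fun r =>
      if pvWin board player k r c then (1 : Int) else 0)).sum)).sum

-- the same double sum over B's window predicate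
def pvTotalB (board : List (List Int)) (player k : Int) : Int :=
  ((PySem.List.pyRange 0 (pvM board - k + 1) 1).map (fun c =>
    ((PySem.List.pyRange (pvN board - k + 1) (pvN board) 1).map (fun r =>
      if pvWinB board player k r c then (1 : Int) else 0)).sum)).sum

-- generic: a fold whose second component gains w x per element
theorem pv_foldl_snd_add {α β : Type} (g : (α × Int) → β → (α × Int)) (w : β → Int)
    (h : ∀ st x, (g st x).2 = st.2 + w x) :
    ∀ (L : List β) (st : α × Int), (L.foldl g st).2 = st.2 + (L.map w).sum := by
  intro L
  induction L with
  | nil => intro st; simp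
  | cons x L ih =>
    intro st
    simp only [List.foldl_cons, List.map_cons, List.sum_cons, ih, h]
    ring

theorem pvWin_false_of_ne (board : List (List Int)) (player k r c : Int)
    (hk : 1 ≤ k) (hne : ¬ pvCell board r c = player) :
    pvWin board player k r c = false := by
  unfold pvWin
  rw [List.all_eq_false]
  refine ⟨0, ?_, ?_⟩
  · rw [PySem.List.mem_pyRange_one]; omega
  · simpa using hne

-- A's inner loop: consectokens counts the matches among the first j steps, and the
-- counter is bumped exactly when all k steps match
theorem pv_innerA_aux (board : List (List Int)) (k r c cnt : Int) (K : Nat) (hK : k = (K : Int))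
    (hK1 : 1 ≤ K) :
    ∀ j : Nat, j ≤ K →
    (((List.range j).map (fun i : Nat => (i : Int))).foldl (fun st kadd =>
      if pvCell board r c == pvCell board (r - kadd) (c + kadd) then
        (st.1 + 1, if st.1 + 1 == k then st.2 + 1 else st.2)
      else st) ((0 : Int), cnt))
    = (((List.range j).countP (fun i : Nat => pvCell board r c == pvCell board (r - i) (c + i)) : Int),
       if j = K ∧ (List.range j).countP (fun i : Nat => pvCell board r c == pvCell board (r - i) (c + i)) = j then cnt + 1 else cnt) := by
  intro j
  induction j with
  | zero => intro _; simp; omega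
  | succ j ih =>
    intro hj
    have hj' : j ≤ K := by omega
    have hMle : (List.range j).countP (fun i : Nat => pvCell board r c == pvCell board (r - i) (c + i)) ≤ j := by
      simpa using List.countP_le_length (l := List.range j)
    rw [List.range_succ, List.map_append, List.foldl_append, ih hj']
    simp only [List.map_cons, List.map_nil, List.foldl_cons, List.foldl_nil, List.countP_append,
      List.countP_cons, List.countP_nil]
    set M := (List.range j).countP (fun i : Nat => pvCell board r c == pvCell board (r - i) (c + i)) with hM
    by_cases hmatch : pvCell board r c == pvCell board (r - (j:Int)) (c + (j:Int))
    · have hiff : ((M:Int) + 1 = k) ↔ (j + 1 = K ∧ M + 1 = j + 1) := by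
        subst hK
        constructor
        · intro h
          have hMK : M + 1 = K := by exact_mod_cast h
          omega
        · rintro ⟨h1, h2⟩
          have hMK : M + 1 = K := by omega
          exact_mod_cast congrArg (fun t : Nat => (t : Int)) hMK
      have hjK : ¬ (j = K ∧ M = j) := by rintro ⟨h1, _⟩; omega
      simp only [hmatch, if_pos, hjK, if_false, Prod.mk.injEq, Nat.zero_add]
      refine ⟨by push_cast; ring, ?_⟩
      by_cases h2 : j + 1 = K ∧ M + 1 = j + 1
      · have hb : ((M:Int) + 1 = k) := hiff.mpr h2
        simp [hb, h2]
      · have hb : ¬((M:Int) + 1 = k) := fun hc => h2 (hiff.mp hc)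
        simp [hb]; omega
    · simp only [Bool.not_eq_true] at hmatch
      have h2 : ¬ (j + 1 = K ∧ M + 0 = j + 1) := by rintro ⟨h1, hx⟩; omega
      have hjK : (j = K ∧ M = j) ↔ False := by
        constructor
        · rintro ⟨h1, _⟩; omega
        · exact False.elim
      simp [hmatch, hjK]
      omega

theorem pv_innerA (board : List (List Int)) (player k r c cnt : Int)
    (hk : 1 ≤ k) (hp : pvCell board r c = player) :
    ((PySem.List.pyRange 0 k 1).foldl (fun st kadd =>
      if pvCell board r c == pvCell board (r - kadd) (c + kadd) then
        (st.1 + 1, if st.1 + 1 == k then st.2 + 1 else st.2)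
      else st) ((0 : Int), cnt)).2
    = cnt + (if pvWin board player k r c then 1 else 0) := by
  obtain ⟨K, hK⟩ : ∃ K : Nat, k = (K : Int) := ⟨k.toNat, by omega⟩
  have hK1 : 1 ≤ K := by omega
  have hrange : PySem.List.pyRange 0 k 1 = (List.range K).map (fun i : Nat => (i : Int)) := by
    rw [PySem.List.pyRange_one]
    simp [hK]
  rw [hrange, pv_innerA_aux board k r c cnt K hK hK1 K le_rfl]
  have hwin : (pvWin board player k r c = true) ↔
      ((List.range K).countP (fun i : Nat => pvCell board r c == pvCell board (r - i) (c + i)) = K) := by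
    unfold pvWin
    rw [hrange]
    have hcpl := List.countP_eq_length (p := fun i : Nat => pvCell board r c == pvCell board (r - i) (c + i)) (l := List.range K)
    rw [List.length_range] at hcpl
    rw [hcpl]
    simp only [List.all_map, List.all_eq_true, Function.comp]
    constructor
    · intro h i hi
      have hq := h i hi
      simp only [beq_iff_eq] at hq ⊢
      rw [hp, hq]
    · intro h i hi
      have hq := h i hi
      simp only [beq_iff_eq] at hq ⊢
      rw [← hq, hp]
  by_cases hw : pvWin board player k r c
  · simp [hwin.mp hw, hw]
  · have : ¬ ((List.range K).countP (fun i : Nat => pvCell board r c == pvCell board (r - i) (c + i)) = K) :=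
      fun hc => hw (hwin.mpr hc)
    simp [this, hw]

theorem pvA_eq_total (board : List (List Int)) (player k : Int) (hk : 1 ≤ k) :
    pos_diagonal_check_k board player k = pvTotal board player k := by
  unfold pos_diagonal_check_k pvTotal pvN pvM
  have e1 : ((PySem.List.pyGetD board 0 []).length : Int) - (k - 1)
      = ((PySem.List.pyGetD board 0 []).length : Int) - k + 1 := by ring
  have e2 : ((board.length : Int)) - (k - 1) = ((board.length : Int)) - k + 1 := by ring
  simp only [e1, e2]
  rw [pv_foldl_snd_add _ (fun c => ((PySem.List.pyRange ((board.length : Int) - k + 1) ((board.length : Int)) 1).map (fun r => if pvWin board player k r c then (1 : Int) else 0)).sum) ?_]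
  · simp
  · intro st column
    rw [pv_foldl_snd_add _ (fun r => if pvWin board player k r column then (1 : Int) else 0) ?_]
    intro st' row
    by_cases hp : pvCell board row column == player
    · simp only [hp, if_pos]
      exact pv_innerA board player k row column st'.2 hk (by simpa using hp)
    · simp only [hp, Bool.false_eq_true, if_neg, not_false_eq_true]
      rw [pvWin_false_of_ne board player k row column hk (by simpa using hp)]
      simp

-- B's run-length rows, expressed through the board (pvStepRowB applied to row t)
def pvStepRow (board : List (List Int)) (player m t : Int) (prev : List Int) : List Int :=
  ((PySem.List.pyRange 0 m 1).map (fun c =>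
    if pvCell board t c == player then PySem.List.pyGetD prev (c + 1) 0 + 1 else 0)) ++ [(0 : Int)]

theorem pv_len_step (board : List (List Int)) (player m t : Int) (prev : List Int) :
    (pvStepRow board player m t prev).length = m.toNat + 1 := by
  unfold pvStepRow
  simp [PySem.List.length_pyRange_one]

theorem pv_entry_lt (board : List (List Int)) (player m t : Int) (prev : List Int) (c : Int)
    (h0 : 0 ≤ c) (hcm : c < m) :
    PySem.List.pyGetD (pvStepRow board player m t prev) c 0
      = if pvCell board t c == player then PySem.List.pyGetD prev (c + 1) 0 + 1 else 0 := by
  have hlen := pv_len_step board player m t prev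
  rw [PySem.List.pyGetD_eq_getElem _ 0 h0 (by rw [hlen]; omega)]
  unfold pvStepRow
  rw [List.getElem_append_left (by simp [PySem.List.length_pyRange_one]; omega)]
  rw [List.getElem_map, PySem.List.getElem_pyRange_one]
  have : (0 : Int) + (c.toNat : Int) = c := by omega
  rw [this]

theorem pv_entry_last (board : List (List Int)) (player m t : Int) (prev : List Int)
    (hm : 0 ≤ m) :
    PySem.List.pyGetD (pvStepRow board player m t prev) m 0 = 0 := by
  have hlen := pv_len_step board player m t prev
  rw [PySem.List.pyGetD_eq_getElem _ 0 hm (by rw [hlen]; omega)]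
  unfold pvStepRow
  rw [List.getElem_append_right (by simp [PySem.List.length_pyRange_one])]
  simp [PySem.List.length_pyRange_one]

theorem pv_entry_replicate (c : Int) (M : Nat) (h0 : 0 ≤ c) (hcm : c < (M : Int)) :
    PySem.List.pyGetD (List.replicate M (0 : Int)) c 0 = 0 := by
  rw [PySem.List.pyGetD_eq_getElem _ 0 h0 (by simp; omega)]
  simp

def pvRowsAux (board : List (List Int)) (player m lo : Int) : Nat → List Int
  | 0 => List.replicate (m.toNat + 1) (0 : Int)
  | j + 1 => pvStepRow board player m (lo + j) (pvRowsAux board player m lo j)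

-- the DP invariant: entry c of row j is the length of the player-run ending there
-- going up-right (truncated at depth j and at column m)
theorem pvRows_entry (board : List (List Int)) (player m lo : Int) (hm : 0 ≤ m) :
    ∀ (j : Nat) (c : Int) (d : Nat), 0 ≤ c → c ≤ m →
      (((d : Int) ≤ PySem.List.pyGetD (pvRowsAux board player m lo j) c 0) ↔
        ((d : Int) ≤ j ∧ c + d ≤ m ∧ ∀ i : Nat, i < d → pvCell board (lo + j - 1 - i) (c + i) = player)) := by
  intro j
  induction j with
  | zero =>
    intro c d h0 hcm
    rw [show pvRowsAux board player m lo 0 = List.replicate (m.toNat + 1) (0 : Int) from rfl]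
    rw [pv_entry_replicate c (m.toNat + 1) h0 (by omega)]
    constructor
    · intro h
      refine ⟨by omega, by omega, fun i hi => absurd hi (by omega)⟩
    · rintro ⟨h1, h2, _⟩
      omega
  | succ j ih =>
    intro c d h0 hcm
    rw [show pvRowsAux board player m lo (j + 1) = pvStepRow board player m (lo + j) (pvRowsAux board player m lo j) from rfl]
    by_cases hcmEq : c = m
    · subst hcmEq
      rw [pv_entry_last board player c (lo + j) _ h0]
      constructor
      · intro h
        refine ⟨by omega, by omega, fun i hi => absurd hi (by omega)⟩
      · rintro ⟨h1, h2, _⟩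
        omega
    · have hlt : c < m := lt_of_le_of_ne hcm hcmEq
      rw [pv_entry_lt board player m (lo + j) _ c h0 hlt]
      by_cases hp : pvCell board (lo + j) c == player
      · rw [if_pos hp]
        have hp' : pvCell board (lo + j) c = player := by simpa using hp
        match d with
        | 0 =>
          have h00 := (ih (c + 1) 0 (by omega) (by omega)).mpr
            ⟨by omega, by omega, fun i hi => absurd hi (by omega)⟩
          constructor
          · intro _
            exact ⟨by omega, by omega, fun i hi => absurd hi (by omega)⟩
          · intro _
            push_cast at h00 ⊢
            omega
        | d' + 1 =>
          have hih := ih (c + 1) d' (by omega) (by omega)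
          constructor
          · intro h
            have hd' : (d' : Int) ≤ PySem.List.pyGetD (pvRowsAux board player m lo j) (c + 1) 0 := by
              push_cast at h ⊢; omega
            obtain ⟨ha, hb, hc⟩ := hih.mp hd'
            refine ⟨by push_cast; omega, by push_cast at hb ⊢; omega, ?_⟩
            intro i hi
            match i with
            | 0 => convert hp' using 2 <;> push_cast <;> ring
            | i' + 1 =>
              have hcc := hc i' (by omega)
              convert hcc using 2 <;> push_cast <;> ring
          · rintro ⟨ha, hb, hc⟩
            have hd' : (d' : Int) ≤ PySem.List.pyGetD (pvRowsAux board player m lo j) (c + 1) 0 := by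
              refine hih.mpr ⟨by push_cast at ha ⊢; omega, by push_cast at hb ⊢; omega, ?_⟩
              intro i hi
              have hcc := hc (i + 1) (by omega)
              convert hcc using 2 <;> push_cast <;> ring
            push_cast at hd' ⊢
            omega
      · rw [if_neg hp]
        constructor
        · intro h
          have hd0 : d = 0 := by omega
          subst hd0
          exact ⟨by omega, by omega, fun i hi => absurd hi (by omega)⟩
        · rintro ⟨ha, hb, hc⟩
          match d with
          | 0 => omega
          | d' + 1 =>
            exfalso
            apply hp
            simp only [beq_iff_eq]
            have h0' := hc 0 (by omega)
            convert h0' using 2 <;> push_cast <;> ring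

-- with lo = 0 the run-length test characterises B's window predicate exactly
theorem pv_run_window (board : List (List Int)) (player m k : Int) (hm : 0 ≤ m) (j : Nat) (c : Int)
    (hk : 1 ≤ k) (h0 : 0 ≤ c) (hcm : c + k ≤ m) :
    (k ≤ PySem.List.pyGetD (pvRowsAux board player m 0 (j + 1)) c 0) ↔
      (pvWinB board player k (j : Int) c = true) := by
  have hent := pvRows_entry board player m 0 hm (j + 1) c k.toNat h0 (by omega)
  rw [show ((k.toNat : Nat) : Int) = k from by omega] at hent
  rw [hent]
  unfold pvWinB pvWin
  rw [Bool.and_eq_true, List.all_eq_true, decide_eq_true_iff]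
  constructor
  · rintro ⟨hj, _, hall⟩
    refine ⟨by push_cast at hj ⊢; omega, ?_⟩
    intro x hx
    rw [PySem.List.mem_pyRange_one] at hx
    have := hall x.toNat (by omega)
    simp only [beq_iff_eq]
    convert this using 2 <;> push_cast <;> omega
  · rintro ⟨hj, hall⟩
    refine ⟨by push_cast; omega, hcm, ?_⟩
    intro i hi
    have := hall (i : Int) (by rw [PySem.List.mem_pyRange_one]; omega)
    simp only [beq_iff_eq] at this
    convert this using 2 <;> push_cast <;> omega

def pvContrib (board : List (List Int)) (player n m k lo : Int) (j : Nat) : Int :=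
  if n - k + 1 ≤ lo + (j : Int) then pvRowCount k m (pvRowsAux board player m lo (j + 1)) else 0

theorem pvB_fold (board : List (List Int)) (player n m k lo : Int) :
    ∀ J : Nat, (PySem.List.pyRange lo (lo + (J : Int)) 1).foldl
        (fun st t =>
          let cur := pvStepRow board player m t st.1
          (cur, if n - k + 1 ≤ t then st.2 + pvRowCount k m cur else st.2))
        (pvRowsAux board player m lo 0, 0)
      = (pvRowsAux board player m lo J,
         ((List.range J).map (pvContrib board player n m k lo)).sum) := by
  intro J
  induction J with
  | zero => simp
  | succ J ih =>
    have hsplit : lo + ((J + 1 : Nat) : Int) = (lo + (J : Int)) + 1 := by push_cast; ring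
    rw [hsplit, PySem.List.pyRange_one_succ_right (by omega : lo ≤ lo + (J : Int))]
    rw [List.foldl_append, ih]
    simp only [List.foldl_cons, List.foldl_nil, List.range_succ, List.map_append, List.sum_append,
      List.map_cons, List.map_nil, List.sum_cons, List.sum_nil]
    unfold pvContrib
    rw [show pvStepRow board player m (lo + (J : Int)) (pvRowsAux board player m lo J)
        = pvRowsAux board player m lo (J + 1) from rfl]
    by_cases hg : n - k + 1 ≤ lo + (J : Int)
    · simp [hg]
    · simp [hg]

-- B's value is the sum of the per-row contributions (scan starting at row 0)
theorem pvB_eq_contribs (board : List (List Int)) (player k : Int) :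
    pos_diagonal_check_k_alt board player k
      = ((List.range board.length).map
          (pvContrib board player (board.length : Int) (pvM board) k 0)).sum := by
  unfold pos_diagonal_check_k_alt
  dsimp only
  rw [PySem.List.enumerate_eq_map_pyRange (d := [])]
  rw [List.foldl_map]
  have hfun : (fun (st : List Int × Int) (j : Int) =>
      let run := pvStepRowB player (pvM board) (PySem.List.pyGetD board j []) st.1
      (run, if (board.length : Int) - k + 1 ≤ j then st.2 + pvRowCount k (pvM board) run else st.2))
      = (fun (st : List Int × Int) (t : Int) =>
      let cur := pvStepRow board player (pvM board) t st.1
      (cur, if (board.length : Int) - k + 1 ≤ t then st.2 + pvRowCount k (pvM board) cur else st.2)) := by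
    funext st j
    rw [show pvStepRowB player (pvM board) (PySem.List.pyGetD board j []) st.1
        = pvStepRow board player (pvM board) j st.1 from rfl]
  rw [show ((PySem.List.pyGetD board 0 []).length : Int) = pvM board from rfl]
  rw [hfun]
  rw [show List.replicate ((pvM board).toNat + 1) (0 : Int) = pvRowsAux board player (pvM board) 0 0 from rfl]
  have h1 : PySem.List.pyRange 0 (PySem.List.len board) 1
      = PySem.List.pyRange 0 ((0 : Int) + ((board.length : Nat) : Int)) 1 := by
    norm_num [PySem.List.len]
  rw [h1, pvB_fold board player ((board.length : Nat) : Int) (pvM board) k 0 board.length]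

def pvRowWinB (board : List (List Int)) (player k m t : Int) : Int :=
  ((PySem.List.pyRange 0 (m - k + 1) 1).countP (fun c => pvWinB board player k t c) : Int)

theorem pv_contrib_eq (board : List (List Int)) (player n m k : Int) (hk : 1 ≤ k)
    (hm : 0 ≤ m) (j : Nat) :
    pvContrib board player n m k 0 j
      = if n - k + 1 ≤ (j : Int) then pvRowWinB board player k m (j : Int) else 0 := by
  unfold pvContrib
  by_cases hg : n - k + 1 ≤ (0 : Int) + (j : Int)
  · rw [if_pos hg, if_pos (by omega)]
    unfold pvRowCount pvRowWinB
    have hcong : ∀ (acc : Int), ∀ c ∈ PySem.List.pyRange 0 (m - k + 1) 1,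
        (if k ≤ PySem.List.pyGetD (pvRowsAux board player m 0 (j + 1)) c 0 then acc + 1 else acc)
        = (if pvWinB board player k (j : Int) c = true then acc + 1 else acc) := by
      intro acc c hc
      rw [PySem.List.mem_pyRange_one] at hc
      have hw := pv_run_window board player m k hm j c hk (by omega) (by omega)
      exact if_congr hw rfl rfl
    rw [PySem.List.foldl_congr_mem _ _ _ _ hcong]
    rw [PySem.List.foldl_count_if]
    simp
  · rw [if_neg hg, if_neg (by omega)]

theorem pv_sum_comm (L M : List Int) (f : Int → Int → Int) :
    (L.map (fun x => (M.map (fun y => f x y)).sum)).sum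
    = (M.map (fun y => (L.map (fun x => f x y)).sum)).sum := by
  induction L with
  | nil => simp
  | cons a L ih => simp [List.map_cons, List.sum_cons, ih]

-- under Pre_'s row-count bound, B equals the double sum over its window predicate
theorem pvB_eq_totalB (board : List (List Int)) (player k : Int) (hk : 2 ≤ k)
    (hn : k - 1 ≤ (board.length : Int)) :
    pos_diagonal_check_k_alt board player k = pvTotalB board player k := by
  rw [pvB_eq_contribs]
  set n : Int := (board.length : Int) with hn'
  set m : Int := pvM board with hm'
  have hm : 0 ≤ m := by rw [hm']; unfold pvM; positivity
  obtain ⟨T, hT⟩ : ∃ T : Nat, (T : Int) = n - k + 1 := ⟨(n - k + 1).toNat, by omega⟩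
  obtain ⟨A, hA⟩ : ∃ A : Nat, (A : Int) = k - 1 := ⟨(k - 1).toNat, by omega⟩
  have hsplit : board.length = T + A := by omega
  rw [hsplit, List.range_add, List.map_append, List.sum_append]
  have hzero : ((List.range T).map (pvContrib board player n m k 0)).sum = 0 := by
    have : ∀ j ∈ List.range T, pvContrib board player n m k 0 j = 0 := by
      intro j hj
      rw [List.mem_range] at hj
      unfold pvContrib
      rw [if_neg (by omega)]
    rw [List.map_congr_left this]
    simp
  rw [hzero, zero_add]
  have hsecond : (((List.range A).map (fun i => T + i)).map (pvContrib board player n m k 0)).sum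
      = ((List.range A).map (fun i : Nat => pvRowWinB board player k m (n - k + 1 + (i : Int)))).sum := by
    rw [List.map_map]
    apply congrArg
    apply List.map_congr_left
    intro i hi
    rw [List.mem_range] at hi
    simp only [Function.comp]
    rw [pv_contrib_eq board player n m k (by omega) hm (T + i)]
    rw [if_pos (by push_cast; omega)]
    have : ((T + i : Nat) : Int) = n - k + 1 + (i : Int) := by push_cast; omega
    rw [this]
  rw [hsecond]
  unfold pvTotalB
  rw [pv_sum_comm]
  rw [show pvN board = n from rfl, show pvM board = m from rfl]
  rw [PySem.List.pyRange_one (n - k + 1) n]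
  rw [show (n - (n - k + 1)).toNat = A from by omega]
  rw [List.map_map]
  apply congrArg
  apply List.map_congr_left
  intro i _
  simp only [Function.comp]
  unfold pvRowWinB
  rw [← PySem.List.sum_map_ite_one_zero]

-- a pointwise-≤ list sum bound, with a strict version
theorem pv_sum_le (L : List Int) (f g : Int → Int) (h : ∀ x ∈ L, f x ≤ g x) :
    (L.map f).sum ≤ (L.map g).sum := by
  induction L with
  | nil => simp
  | cons a L ih =>
    simp only [List.map_cons, List.sum_cons]
    have := h a (by simp)
    have := ih (fun x hx => h x (by simp [hx]))
    omega

theorem pv_sum_lt (L : List Int) (f g : Int → Int) (h : ∀ x ∈ L, f x ≤ g x)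
    (x0 : Int) (hx0 : x0 ∈ L) (hs : f x0 < g x0) :
    (L.map f).sum < (L.map g).sum := by
  induction L with
  | nil => simp at hx0
  | cons a L ih =>
    simp only [List.map_cons, List.sum_cons]
    rcases List.mem_cons.mp hx0 with h1 | h1
    · subst h1
      have := pv_sum_le L f g (fun x hx => h x (by simp [hx]))
      omega
    · have := h a (by simp)
      have := ih (fun x hx => h x (by simp [hx])) h1
      omega

-- D_'s doubled-list cell access agrees with Python indexing on in-range wrapped rows
theorem pvDCell_eq (board : List (List Int)) (r c : Int)
    (hr1 : -(board.length : Int) ≤ r) (hr2 : r < (board.length : Int)) (hc : 0 ≤ c) :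
    (((board ++ board).getD ((board.length : Int) + r).toNat []).getD c.toNat 0)
      = pvCell board r c := by
  unfold pvCell
  have hrow : (board ++ board).getD ((board.length : Int) + r).toNat []
      = PySem.List.pyGetD board r [] := by
    rw [List.getD_eq_getElem _ _ (by simp; omega)]
    by_cases hneg : r < 0
    · rw [List.getElem_append_left (by omega)]
      obtain ⟨kk, hkk⟩ : ∃ kk : Nat, r = -(kk : Int) := ⟨(-r).toNat, by omega⟩
      subst hkk
      rw [PySem.List.pyGetD_neg_natCast _ _ _ (by omega) (by omega)]
      congr 1
      omega
    · rw [List.getElem_append_right (by omega)]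
      rw [PySem.List.pyGetD_eq_getElem _ _ (by omega) (by omega)]
      congr 1
      omega
  rw [hrow]
  set row := PySem.List.pyGetD board r [] with hrw
  by_cases hcl : c < (row.length : Int)
  · rw [PySem.List.pyGetD_eq_getElem _ _ hc hcl, List.getD_eq_getElem _ _ (by omega)]
  · rw [List.getD_eq_default _ _ (by omega)]
    rw [PySem.List.pyGetD_of_none]
    unfold PySem.List.pyGet? PySem.List.pyIdx?
    split_ifs <;> rfl

-- outside D_ every window in the scanned band lies on the board, so the predicates agree
theorem pv_totals_eq (board : List (List Int)) (player k : Int) (hk : 2 ≤ k)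
    (hkm : k ≤ pvM board) (hn : k - 1 ≤ pvN board)
    (hnd : ¬ D_pos_diagonal_check_k board player k) :
    pvTotal board player k = pvTotalB board player k := by
  have hmM : ((board.headD []).length : Int) = pvM board := by
    unfold pvM
    cases board <;> simp [PySem.List.pyGetD]
  have hN : pvN board = (board.length : Int) := rfl
  rw [← hmM] at hkm
  rw [hN] at hn
  unfold pvTotal pvTotalB
  apply congrArg
  apply List.map_congr_left
  intro c hc
  rw [PySem.List.mem_pyRange_one, ← hmM] at hc
  apply congrArg
  apply List.map_congr_left
  intro r hr
  rw [PySem.List.mem_pyRange_one, hN] at hr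
  by_cases hkr : k ≤ r + 1
  · unfold pvWinB
    rw [decide_eq_true hkr, Bool.true_and]
  · have hwf : pvWin board player k r c = false := by
      by_contra hw
      rw [Bool.not_eq_false] at hw
      apply hnd
      refine ⟨by omega, r, ?_, c, ?_, ?_⟩
      · rw [PySem.List.mem_pyRange_one]
        omega
      · rw [PySem.List.mem_pyRange_one]
        omega
      · intro i hi
        unfold pvWin at hw
        rw [List.all_eq_true] at hw
        have hcell := hw i hi
        rw [PySem.List.mem_pyRange_one] at hi
        rw [show (board.length : Int) + r - i = (board.length : Int) + (r - i) from by ring,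
            pvDCell_eq board (r - i) (c + i) (by omega) (by omega) (by omega)]
        simpa using hcell
    unfold pvWinB
    rw [hwf, Bool.and_false]

-- inside D_ the wrapped witness window makes A's total strictly larger than B's
theorem pv_totals_lt (board : List (List Int)) (player k : Int)
    (hn : k - 1 ≤ pvN board)
    (hd : D_pos_diagonal_check_k board player k) :
    pvTotalB board player k < pvTotal board player k := by
  obtain ⟨hn1, r0, hr0, c0, hc0, hwit⟩ := hd
  have hmM : ((board.headD []).length : Int) = pvM board := by
    unfold pvM
    cases board <;> simp [PySem.List.pyGetD]
  rw [PySem.List.mem_pyRange_one] at hr0 hc0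
  rw [hmM] at hc0
  unfold pvTotal pvTotalB
  apply pv_sum_lt _ _ _ ?_ c0 ?_ ?_
  · intro c _
    apply pv_sum_le
    intro r _
    unfold pvWinB
    by_cases hw : pvWin board player k r c
    · rw [hw]
      split_ifs <;> simp_all
    · rw [Bool.not_eq_true] at hw
      rw [hw, Bool.and_false]
  · rw [PySem.List.mem_pyRange_one]
    omega
  · apply pv_sum_lt _ _ _ ?_ r0 ?_ ?_
    · intro r _
      unfold pvWinB
      by_cases hw : pvWin board player k r c0
      · rw [hw]
        split_ifs <;> simp_all
      · rw [Bool.not_eq_true] at hw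
        rw [hw, Bool.and_false]
    · rw [PySem.List.mem_pyRange_one]
      unfold pvN
      omega
    · have hwin : pvWin board player k r0 c0 = true := by
        unfold pvWin
        rw [List.all_eq_true]
        intro i hi
        have hcell := hwit i hi
        rw [PySem.List.mem_pyRange_one] at hi
        rw [show (board.length : Int) + r0 - i = (board.length : Int) + (r0 - i) from by ring,
            pvDCell_eq board (r0 - i) (c0 + i) (by unfold pvN at hn; omega)
            (by unfold pvN at hn; omega) (by omega)] at hcell
        simpa using hcell
      have hwinB : pvWinB board player k r0 c0 = false := by
        unfold pvWinB
        rw [decide_eq_false (by omega : ¬ k ≤ r0 + 1)]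
        simp
      rw [hwin, hwinB]
      simp

-- with no window fitting or k ≤ 1, both programs return 0
theorem pvB_zero_of_small (board : List (List Int)) (player k : Int)
    (h : k ≤ 1 ∨ pvM board < k) :
    pos_diagonal_check_k_alt board player k = 0 := by
  rw [pvB_eq_contribs]
  have : ∀ j ∈ List.range board.length, pvContrib board player (board.length : Int) (pvM board) k 0 j = 0 := by
    intro j hj
    rw [List.mem_range] at hj
    unfold pvContrib
    rcases h with h | h
    · rw [if_neg (by omega)]
    · by_cases hg : (board.length : Int) - k + 1 ≤ 0 + (j : Int)
      · rw [if_pos hg]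
        unfold pvRowCount
        rw [show PySem.List.pyRange 0 (pvM board - k + 1) 1 = []
            from PySem.List.pyRange_one_eq_nil (by omega)]
        rfl
      · rw [if_neg hg]
  rw [List.map_congr_left this]
  simp

-- ===== VERDICT (by name: the statements are the Claim_ definitions above) =====
theorem pos_diagonal_check_k_spec : Claim_unchanged_pos_diagonal_check_k := by
  intro board player k _ hpre hnd
  obtain ⟨hne, hrows, hband⟩ := hpre
  have hmM : ((board.headD []).length : Int) = pvM board := by
    unfold pvM
    cases board <;> simp [PySem.List.pyGetD]
  by_cases hk2 : 2 ≤ k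
  · by_cases hmk : pvM board < k
    · -- no window of k columns fits: both sides are 0
      rw [pvA_eq_total board player k (by omega), pvB_zero_of_small board player k (Or.inr hmk)]
      unfold pvTotal
      rw [show PySem.List.pyRange 0 (pvM board - k + 1) 1 = []
          from PySem.List.pyRange_one_eq_nil (by omega)]
      rfl
    · have hn : k - 1 ≤ pvN board := by
        unfold pvN
        exact hband hk2 (by omega)
      rw [pvA_eq_total board player k (by omega),
          pvB_eq_totalB board player k hk2 hn]
      exact pv_totals_eq board player k hk2 (by omega) hn hnd
  · -- k ≤ 1: A's row range is empty and B's guard never fires; both return 0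
    rw [pvB_zero_of_small board player k (Or.inl (by omega))]
    unfold pos_diagonal_check_k
    dsimp only
    rw [show PySem.List.pyRange ((board.length : Int) - (k - 1)) (board.length : Int) 1 = []
        from PySem.List.pyRange_one_eq_nil (by omega)]
    simp only [List.foldl_nil]
    induction PySem.List.pyRange 0 (((PySem.List.pyGetD board 0 []).length : Int) - (k - 1)) 1 with
    | nil => rfl
    | cons x L ih => simpa using ih

theorem pos_diagonal_check_k_changed : Claim_changed_pos_diagonal_check_k := by
  unfold Claim_changed_pos_diagonal_check_k; decide

theorem pos_diagonal_check_k_tight : Claim_exact_pos_diagonal_check_k := by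
  intro board player k _ hpre hd
  have hmM : ((board.headD []).length : Int) = pvM board := by
    unfold pvM
    cases board <;> simp [PySem.List.pyGetD]
  obtain ⟨hn1, r0, hr0, c0, hc0, hwit⟩ := hd
  rw [PySem.List.mem_pyRange_one] at hr0 hc0
  have hk2 : 2 ≤ k := by omega
  have hn : k - 1 ≤ pvN board := by unfold pvN; omega
  rw [pvA_eq_total board player k (by omega), pvB_eq_totalB board player k hk2 hn]
  have := pv_totals_lt board player k hn ⟨hn1, r0, by rw [PySem.List.mem_pyRange_one]; omega,
    c0, by rw [PySem.List.mem_pyRange_one]; omega, hwit⟩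
  omega
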